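-- pv_equiv track=rewrite | github.com/nelsonbighetti/profinternships2021 | k-anon-datagen/main.py | getClusterBorders
-- ===== SOURCE A (Python) =====
-- import math
--
-- def getClusterBorders(t_len, count):
--     mul = math.floor(t_len/count)
--     ranges = []
--     for c in range(count):
--         ranges.append([mul * c, mul * (c + 1) - 1])
--
--     if t_len%count:
--         ranges[-1][1] = t_len-1
--
--     return ranges
-- ===== SOURCE B (Python) =====
-- def getClusterBorders(t_len, count):
--     # Back-to-front construction by repeated subtraction: start from the final
--     # upper bound t_len - 1, peel off chunks (the chunk built first absorbs the
--     # remainder), then reverse. No per-index multiplication, no post-patch.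
--     q, r = divmod(t_len, count)
--     ranges = []
--     hi = t_len - 1
--     lo = hi - (q + r) + 1
--     for _ in range(count):
--         ranges.append([lo, hi])
--         hi = lo - 1
--         lo = hi - q + 1
--     ranges.reverse()
--     return ranges
-- ===== Notes on version B (the rewrite author's own statement) =====
-- stated objective: alternative
-- what changed: B constructs the ranges back-to-front by repeated subtraction from the running upper bound t_len-1 (the first-built, last-positioned chunk absorbs the remainder) and reverses at the end, instead of A's per-index multiplication formula followed by an in-place patch of the last range.
import Mathlib
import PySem

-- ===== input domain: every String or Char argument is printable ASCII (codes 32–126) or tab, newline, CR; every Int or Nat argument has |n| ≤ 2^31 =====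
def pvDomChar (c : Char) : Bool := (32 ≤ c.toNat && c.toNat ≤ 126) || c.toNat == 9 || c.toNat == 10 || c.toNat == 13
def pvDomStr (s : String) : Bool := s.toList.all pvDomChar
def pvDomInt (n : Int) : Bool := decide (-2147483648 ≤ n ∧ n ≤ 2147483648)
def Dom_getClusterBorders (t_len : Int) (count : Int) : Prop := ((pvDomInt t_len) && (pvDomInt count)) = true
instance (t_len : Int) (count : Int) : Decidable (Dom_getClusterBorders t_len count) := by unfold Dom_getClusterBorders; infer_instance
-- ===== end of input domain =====

-- B builds the ranges back-to-front by repeated subtraction from the running upper bound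
-- t_len - 1 and reverses at the end, instead of A's per-index multiplication formula plus
-- an in-place patch of the last range (alternative decomposition, same cost).

-- ===== PORT A =====
-- math.floor(t_len/count) equals floor division on |n| ≤ 2^31 (float division is exact there).
def getClusterBorders (t_len : Int) (count : Int) : List (List Int) :=
  let mul := PySem.Int.floordiv t_len count
  let ranges := (PySem.List.pyRange 0 count 1).foldl
    (fun ranges c => ranges ++ [[mul * c, mul * (c + 1) - 1]]) []
  if PySem.Int.mod t_len count ≠ 0 then
    -- ranges[-1][1] = t_len - 1 : rewrite entry 1 of the last element (IndexError on empty ranges is outside Pre_)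
    match ranges.getLast? with
    | some last => ranges.dropLast ++ [last.set 1 (t_len - 1)]
    | none => ranges
  else ranges

-- ===== PORT B =====
def getClusterBorders_alt (t_len : Int) (count : Int) : List (List Int) :=
  match PySem.Int.divmod? t_len count with
  | none => []   -- count = 0: divmod raises ZeroDivisionError (outside Pre_)
  | some (q, r) =>
    -- state: (ranges, hi, lo); each step appends [lo, hi] and slides both bounds down
    let s := (PySem.List.pyRange 0 count 1).foldl
      (fun (st : List (List Int) × Int × Int) _ =>
        (st.1 ++ [[st.2.2, st.2.1]], st.2.2 - 1, st.2.2 - 1 - q + 1))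
      ([], t_len - 1, t_len - 1 - (q + r) + 1)
    s.1.reverse

-- ===== PRECONDITION & SPEC =====
-- Pre_ excludes exactly the inputs where A raises: count = 0 (ZeroDivisionError) and
-- count < 0 with a nonzero remainder (ranges[-1] on the empty list, IndexError).
def Pre_getClusterBorders (t_len : Int) (count : Int) : Prop :=
  count ≠ 0 ∧ (0 < count ∨ PySem.Int.mod t_len count = 0)
instance (t_len : Int) (count : Int) : Decidable (Pre_getClusterBorders t_len count) := by
  unfold Pre_getClusterBorders; infer_instance
def pvWitness_getClusterBorders : Int × Int := (10, 3)

def Spec_getClusterBorders (t_len : Int) (count : Int) (out : List (List Int)) : Prop :=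
  out = getClusterBorders_alt t_len count
instance (t_len : Int) (count : Int) (out : List (List Int)) : Decidable (Spec_getClusterBorders t_len count out) := by unfold Spec_getClusterBorders; infer_instance

-- ===== CLAIM (what is proved, stated in full; the proofs are below) =====
def Claim_equal_getClusterBorders : Prop := ∀ (t_len : Int) (count : Int), Dom_getClusterBorders t_len count → Pre_getClusterBorders t_len count → Spec_getClusterBorders t_len count (getClusterBorders t_len count)
-- ===== LEMMAS AND PROOFS =====

theorem pv_foldl_app {α β : Type} (l : List α) (f : α → β) (init : List β) :
    l.foldl (fun acc c => acc ++ [f c]) init = init ++ l.map f := by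
  induction l generalizing init with
  | nil => simp
  | cons x xs ih => simp [List.foldl_cons, ih]

-- Closed form for B's fold: entry j is [lo - q*j, hi] for j = 0 and [lo - q*j, lo - q*(j-1) - 1] after.
theorem pv_foldB {α : Type} (q : Int) (l : List α) (res : List (List Int)) (hi lo : Int) :
    (l.foldl (fun (st : List (List Int) × Int × Int) _ =>
        (st.1 ++ [[st.2.2, st.2.1]], st.2.2 - 1, st.2.2 - 1 - q + 1)) (res, hi, lo)).1
    = res ++ (List.range l.length).map
        (fun (j : Nat) => [lo - q * (j : Int), if j = 0 then hi else lo - q * ((j : Int) - 1) - 1]) := by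
  induction l generalizing res hi lo with
  | nil => simp
  | cons x xs ih =>
    rw [List.foldl_cons, ih, List.length_cons, List.range_succ_eq_map, List.map_cons,
      List.map_map, List.append_assoc, List.singleton_append]
    congr 1
    congr 1
    · norm_num
    · apply List.map_congr_left
      intro j _
      simp only [Function.comp_def, Nat.succ_eq_add_one]
      by_cases hj0 : j = 0
      · subst hj0; norm_num; ring
      · rw [if_neg hj0, if_neg (by omega : ¬ j + 1 = 0)]
        push_cast
        simp only [List.cons.injEq, and_true]
        exact ⟨by ring, by ring⟩


-- ===== VERDICT (by name: the statement is the Claim_ definition above) =====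
theorem getClusterBorders_spec : Claim_equal_getClusterBorders := by
  intro t_len count _ hpre
  obtain ⟨hne, hpos⟩ := hpre
  unfold Spec_getClusterBorders
  unfold getClusterBorders getClusterBorders_alt
  have hdm : PySem.Int.divmod? t_len count
      = some (PySem.Int.floordiv t_len count, PySem.Int.mod t_len count) := by
    simp [PySem.Int.divmod?, PySem.Int.floordiv, PySem.Int.mod, hne]
  rw [hdm]
  simp only [pv_foldl_app, List.nil_append, pv_foldB]
  set q := PySem.Int.floordiv t_len count with hq
  set r := PySem.Int.mod t_len count with hr
  have hqr : q * count + r = t_len := PySem.Int.floordiv_mul_add_mod t_len count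
  rcases lt_or_gt_of_ne hne with hneg | hposc
  · have h0 : PySem.List.pyRange 0 count 1 = [] := PySem.List.pyRange_one_eq_nil (by omega)
    have hr0 : r = 0 := by rcases hpos with h | h; · omega
                           · exact h
    simp [h0, hr0]
  · obtain ⟨n, rfl⟩ : ∃ n : Nat, count = (n:Int) := ⟨count.toNat, by omega⟩
    have hn0 : 0 < n := by exact_mod_cast hposc
    have h1n : 1 ≤ n := hn0
    have hR : PySem.List.pyRange 0 (n:Int) 1 = (List.range n).map (fun k : Nat => (k:Int)) := by
      simp [PySem.List.pyRange_one]
    rw [hR]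
    simp only [List.map_map, List.length_map, List.length_range, Function.comp_def]
    have hlo : t_len - 1 - (q + r) + 1 = q * ((n:Int) - 1) := by push_cast at hqr ⊢; linarith [hqr]
    rw [hlo]
    -- the left-hand side (A, possibly patched) as a single map
    have hA : (if r ≠ 0 then
          match ((List.range n).map (fun x : Nat => [q * (x:Int), q * ((x:Int) + 1) - 1])).getLast? with
          | some last =>
              ((List.range n).map (fun x : Nat => [q * (x:Int), q * ((x:Int) + 1) - 1])).dropLast
                ++ [last.set 1 (t_len - 1)]
          | none => (List.range n).map (fun x : Nat => [q * (x:Int), q * ((x:Int) + 1) - 1])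
        else (List.range n).map (fun x : Nat => [q * (x:Int), q * ((x:Int) + 1) - 1]))
        = (List.range n).map
            (fun i : Nat => [q * (i:Int), if i = n - 1 then t_len - 1 else q * ((i:Int) + 1) - 1]) := by
      by_cases hr0 : r = 0
      · rw [if_neg (not_not_intro hr0)]
        apply List.map_congr_left; intro i hi
        have hi' : i < n := List.mem_range.mp hi
        by_cases hlast : i = n - 1
        · rw [if_pos hlast, hlast]
          have hq' : q * (((n - 1 : Nat) : Int) + 1) = t_len := by
            push_cast [Nat.cast_sub h1n] at hqr ⊢
            linarith [hqr]
          rw [hq']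
        · rw [if_neg hlast]
      · rw [if_pos hr0]
        obtain ⟨m, rfl⟩ : ∃ m, n = m + 1 := ⟨n - 1, by omega⟩
        rw [List.range_succ]
        simp only [List.map_append, List.map_cons, List.map_nil, List.getLast?_concat,
          List.dropLast_concat]
        congr 1
        · apply List.map_congr_left; intro i hi
          have hi' : i < m := List.mem_range.mp hi
          rw [if_neg (by omega)]
        · simp [List.set]
    rw [hA]
    -- compare element-wise with the reversed B list
    apply List.ext_getElem
    · simp
    · intro i h1 h2
      have hn' : i < n := by simpa using h1
      rw [List.getElem_reverse]
      simp only [List.getElem_map, List.getElem_range, List.length_map, List.length_range]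
      by_cases hlast : i = n - 1
      · subst hlast
        rw [if_pos rfl, if_pos (by omega : n - 1 - (n - 1) = 0)]
        have hc : ((n - 1 - (n - 1) : Nat) : Int) = 0 := by norm_num
        rw [hc]
        have hc2 : ((n - 1 : Nat) : Int) = (n:Int) - 1 := by push_cast [Nat.cast_sub h1n]; ring
        rw [hc2]
        norm_num
      · rw [if_neg hlast, if_neg (by omega : ¬ n - 1 - i = 0)]
        have hci : ((n - 1 - i : Nat) : Int) = (n:Int) - 1 - i := by
          have : i ≤ n - 1 := by omega
          push_cast [Nat.cast_sub this, Nat.cast_sub h1n]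
          ring
        rw [hci]
        simp only [List.cons.injEq, and_true]
        exact ⟨by ring, by ring⟩
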